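-- pv_equiv track=rewrite | github.com/kango2/ausarg | scripts/illumina_fastq_stats.py | average_per_base_quality
-- ===== SOURCE A (Python) =====
-- def phred_to_quality(phred_string):
--     """Convert Phred encoded quality string to a list of numerical quality values."""
--     return [ord(char) - 33 for char in phred_string]
--
-- def average_per_base_quality(quality_scores):
--     """Calculate average per base quality values across all reads."""
--     total_scores = [0] * max(len(qs) for qs in quality_scores)
--     count_scores = [0] * max(len(qs) for qs in quality_scores)  # Count of scores for each position
--
--     for qs in quality_scores:
--         scores = phred_to_quality(qs)
--         for i, score in enumerate(scores):
--             total_scores[i] += score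
--             count_scores[i] += 1  # Increment count for that position
--
--     # Calculate average by dividing total score by count for each position
--     return [round(total_scores[i] / count_scores[i]) if count_scores[i] != 0 else 0 for i in range(len(total_scores))]
-- ===== SOURCE B (Python) =====
-- def average_per_base_quality(quality_scores):
--     """Calculate average per base quality values across all reads (column-major)."""
--     width = max(len(qs) for qs in quality_scores)
--     averages = []
--     for i in range(width):
--         vals = [ord(qs[i]) - 33 for qs in quality_scores if i < len(qs)]
--         averages.append(round(sum(vals) / len(vals)))
--     return averages
-- ===== Notes on version B (the rewrite author's own statement) =====
-- stated objective: simpler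
-- what changed: Column-major traversal: for each position, gather that column's scores directly and average them, replacing A's two pre-allocated accumulator arrays and row-major nested update loop.
import Mathlib
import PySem

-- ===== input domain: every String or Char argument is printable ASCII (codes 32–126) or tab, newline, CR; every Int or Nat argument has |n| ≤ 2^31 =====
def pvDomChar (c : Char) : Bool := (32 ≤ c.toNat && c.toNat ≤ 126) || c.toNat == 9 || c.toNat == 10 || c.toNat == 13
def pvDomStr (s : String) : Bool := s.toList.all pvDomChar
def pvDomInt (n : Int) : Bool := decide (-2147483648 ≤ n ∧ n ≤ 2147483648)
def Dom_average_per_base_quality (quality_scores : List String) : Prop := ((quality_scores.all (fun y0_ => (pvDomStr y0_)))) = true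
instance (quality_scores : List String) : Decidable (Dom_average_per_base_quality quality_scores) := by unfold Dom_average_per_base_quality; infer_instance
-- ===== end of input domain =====

-- B replaces A's row-major accumulator arrays with a per-position (column-major) reduction; objective: simpler.


-- Shared primitive: Python's round(a / b) for 0 < b, modeled exactly as round-half-to-even on the
-- rational a/b (exact on Dom: the float a/b only misrounds for denominators far beyond 2^31).
def pyRoundDiv (a b : Int) : Int :=
  let q := PySem.Int.floordiv a b
  let r := a - q * b
  if 2 * r < b then q
  else if b < 2 * r then q + 1
  else if PySem.Int.mod q 2 = 0 then q else q + 1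

-- ===== PORT A =====
def phred_to_quality (phred_string : String) : List Int :=
  phred_string.toList.map (fun ch => (ch.toNat : Int) - 33)

-- 'for i, score in enumerate(scores): total[i] += score; count[i] += 1'
def pA_inner : List Int → Nat → List Int × List Int → List Int × List Int
  | [], _, tc => tc
  | score :: rest, i, (t, c) =>
      pA_inner rest (i + 1) (t.set i (t.getD i 0 + score), c.set i (c.getD i 0 + 1))

def average_per_base_quality (quality_scores : List String) : List Int :=
  -- max(...) raises ValueError on an empty list: Pre_ excludes it
  let total0 : List Int :=
    List.replicate ((PySem.List.max? (quality_scores.map (fun qs => PySem.Str.len qs)) (fun x => x)).getD 0).toNat 0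
  let count0 : List Int :=
    List.replicate ((PySem.List.max? (quality_scores.map (fun qs => PySem.Str.len qs)) (fun x => x)).getD 0).toNat 0
  let tc := quality_scores.foldl (fun tc qs => pA_inner (phred_to_quality qs) 0 tc) (total0, count0)
  (List.range tc.1.length).map (fun i =>
    if tc.2.getD i 0 ≠ 0 then pyRoundDiv (tc.1.getD i 0) (tc.2.getD i 0) else 0)

-- ===== PORT B =====
def average_per_base_quality_alt (quality_scores : List String) : List Int :=
  -- width = max(len(qs) ...): raises ValueError on an empty list, excluded by Pre_
  let width := (PySem.List.max? (quality_scores.map (fun qs => PySem.Str.len qs)) (fun x => x)).getD 0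
  (PySem.List.pyRange 0 width 1).map (fun i =>
    let vals := quality_scores.filterMap (fun qs =>
      if i < PySem.Str.len qs then (PySem.Str.pyGet? qs i).map (fun ch => (ch.toNat : Int) - 33) else none)
    pyRoundDiv vals.sum (vals.length : Int))

-- ===== PRECONDITION & SPEC =====
-- Pre_ excludes only the empty list, on which both Pythons raise ValueError (max() of an empty sequence).
def Pre_average_per_base_quality (quality_scores : List String) : Prop := quality_scores ≠ []
instance (quality_scores : List String) : Decidable (Pre_average_per_base_quality quality_scores) := by unfold Pre_average_per_base_quality; infer_instance
def pvWitness_average_per_base_quality : List String := ["II5!", "I#"]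

def Spec_average_per_base_quality (quality_scores : List String) (out : List Int) : Prop := out = average_per_base_quality_alt quality_scores
instance (quality_scores : List String) (out : List Int) : Decidable (Spec_average_per_base_quality quality_scores out) := by unfold Spec_average_per_base_quality; infer_instance

-- ===== CLAIM (what is proved, stated in full; the proofs are below) =====
def Claim_equal_average_per_base_quality : Prop := ∀ (quality_scores : List String), Dom_average_per_base_quality quality_scores → Pre_average_per_base_quality quality_scores → Spec_average_per_base_quality quality_scores (average_per_base_quality quality_scores)

-- ===== LEMMAS AND PROOFS =====

-- the scores present at column j, in read order (the common value both programs average)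
def colVals (qss : List String) (j : Nat) : List Int :=
  qss.filterMap (fun qs => (qs.toList[j]?).map (fun ch => (ch.toNat : Int) - 33))

-- helper getD/set facts specialised to our accumulator lists
theorem pv_getD_set_self (l : List Int) (i : Nat) (a : Int) (h : i < l.length) :
    (l.set i a).getD i 0 = a := by simp [List.getD, h]

theorem pv_getD_set_ne (l : List Int) (i j : Nat) (a : Int) (h : i ≠ j) :
    (l.set i a).getD j 0 = l.getD j 0 := by simp [List.getD, List.getElem?_set_ne h]

theorem pv_getD_replicate (n j : Nat) : (List.replicate n (0:Int)).getD j 0 = 0 := by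
  rcases Nat.lt_or_ge j n with h | h
  · simp [List.getD, h]
  · rw [List.getD, List.getElem?_eq_none (l := List.replicate n (0:Int)) (by simpa using h)]
    rfl

theorem pA_inner_len (ss : List Int) (i : Nat) (t c : List Int) :
    (pA_inner ss i (t, c)).1.length = t.length ∧ (pA_inner ss i (t, c)).2.length = c.length := by
  induction ss generalizing i t c with
  | nil => simp [pA_inner]
  | cons s rest ih =>
    simpa [pA_inner] using ih (i + 1) (t.set i (t.getD i 0 + s)) (c.set i (c.getD i 0 + 1))

theorem pA_inner_getD (ss : List Int) (i : Nat) (t c : List Int)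
    (ht : i + ss.length ≤ t.length) (hc : i + ss.length ≤ c.length) (j : Nat) :
    (pA_inner ss i (t, c)).1.getD j 0
      = t.getD j 0 + (if i ≤ j ∧ j < i + ss.length then ss.getD (j - i) 0 else 0) ∧
    (pA_inner ss i (t, c)).2.getD j 0
      = c.getD j 0 + (if i ≤ j ∧ j < i + ss.length then 1 else 0) := by
  induction ss generalizing i t c with
  | nil => simp [pA_inner]
  | cons s rest ih =>
    simp only [List.length_cons] at ht hc
    have hi_t : i < t.length := by omega
    have hi_c : i < c.length := by omega
    have ih' := ih (i + 1) (t.set i (t.getD i 0 + s)) (c.set i (c.getD i 0 + 1))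
      (by simp only [List.length_set]; omega) (by simp only [List.length_set]; omega)
    rw [pA_inner]
    simp only [List.length_cons]
    rcases eq_or_ne i j with hij | hij
    · subst hij
      rw [ih'.1, ih'.2, pv_getD_set_self _ _ _ hi_t, pv_getD_set_self _ _ _ hi_c]
      constructor
      · rw [if_neg (by omega), if_pos (by omega)]
        simp
      · rw [if_neg (by omega), if_pos (by omega)]
        ring
    · rw [ih'.1, ih'.2, pv_getD_set_ne _ _ _ _ hij, pv_getD_set_ne _ _ _ _ hij]
      rcases Nat.lt_or_ge j i with hlt | hge
      · rw [if_neg (by omega), if_neg (by omega), if_neg (by omega), if_neg (by omega)]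
        exact ⟨rfl, rfl⟩
      · have hge' : i + 1 ≤ j := by omega
        constructor
        · by_cases hub : j < i + 1 + rest.length
          · rw [if_pos ⟨hge', hub⟩, if_pos (by omega)]
            have hji : j - i = (j - (i + 1)) + 1 := by omega
            simp [hji]
          · rw [if_neg (by omega), if_neg (by omega)]
        · by_cases hub : j < i + 1 + rest.length
          · rw [if_pos ⟨hge', hub⟩, if_pos (by omega)]
          · rw [if_neg (by omega), if_neg (by omega)]

theorem colVals_cons (qs : String) (qss : List String) (j : Nat) :
    colVals (qs :: qss) j
      = (match (qs.toList[j]?).map (fun ch => (ch.toNat : Int) - 33) with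
         | some v => v :: colVals qss j
         | none => colVals qss j) := by
  cases h : (qs.toList[j]?).map (fun ch => (ch.toNat : Int) - 33) <;> simp [colVals, h]

theorem phred_len (qs : String) : (phred_to_quality qs).length = qs.toList.length := by
  simp [phred_to_quality]

theorem pA_fold_len (qss : List String) (t c : List Int) :
    (qss.foldl (fun tc qs => pA_inner (phred_to_quality qs) 0 tc) (t, c)).1.length = t.length ∧
    (qss.foldl (fun tc qs => pA_inner (phred_to_quality qs) 0 tc) (t, c)).2.length = c.length := by
  induction qss generalizing t c with
  | nil => simp
  | cons qs qss ih =>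
    rw [List.foldl_cons]
    have h := pA_inner_len (phred_to_quality qs) 0 t c
    have := ih (pA_inner (phred_to_quality qs) 0 (t, c)).1 (pA_inner (phred_to_quality qs) 0 (t, c)).2
    rw [Prod.mk.eta] at this
    omega

theorem pA_fold_getD (qss : List String) (t c : List Int)
    (hb : ∀ qs ∈ qss, qs.toList.length ≤ t.length)
    (hb' : ∀ qs ∈ qss, qs.toList.length ≤ c.length) (j : Nat) :
    (qss.foldl (fun tc qs => pA_inner (phred_to_quality qs) 0 tc) (t, c)).1.getD j 0
      = t.getD j 0 + (colVals qss j).sum ∧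
    (qss.foldl (fun tc qs => pA_inner (phred_to_quality qs) 0 tc) (t, c)).2.getD j 0
      = c.getD j 0 + ((colVals qss j).length : Int) := by
  induction qss generalizing t c with
  | nil => simp [colVals]
  | cons qs qss ih =>
    rw [List.foldl_cons]
    set t' := (pA_inner (phred_to_quality qs) 0 (t, c)).1 with ht'
    set c' := (pA_inner (phred_to_quality qs) 0 (t, c)).2 with hc'
    have hlen := pA_inner_len (phred_to_quality qs) 0 t c
    have hbt : qs.toList.length ≤ t.length := hb qs (by simp)
    have hbc : qs.toList.length ≤ c.length := hb' qs (by simp)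
    have hinner := pA_inner_getD (phred_to_quality qs) 0 t c
      (by rw [phred_len]; omega) (by rw [phred_len]; omega) j
    have ih' := ih t' c'
      (fun q hq => by rw [ht', hlen.1]; exact hb q (by simp [hq]))
      (fun q hq => by rw [hc', hlen.2]; exact hb' q (by simp [hq]))
    rw [Prod.mk.eta] at ih'
    rw [ih'.1, ih'.2, hinner.1, hinner.2, colVals_cons]
    by_cases hj : j < qs.toList.length
    · have hgs : qs.toList[j]? = some (qs.toList[j]) := List.getElem?_eq_getElem hj
      have hsd : (phred_to_quality qs).getD (j - 0) 0 = (qs.toList[j].toNat : Int) - 33 := by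
        simp [phred_to_quality, List.getD, List.getElem?_map, hgs]
      rw [if_pos (by rw [phred_len]; omega), if_pos (by rw [phred_len]; omega), hsd, hgs]
      simp; constructor <;> ring
    · have hgs : qs.toList[j]? = none := List.getElem?_eq_none (by omega)
      rw [if_neg (by rw [phred_len]; omega), if_neg (by rw [phred_len]; omega), hgs]
      simp

-- B's per-column comprehension collects exactly colVals
theorem alt_vals (qss : List String) (j : Nat) :
    qss.filterMap (fun qs =>
        if (j : Int) < PySem.Str.len qs
        then (PySem.Str.pyGet? qs (j : Int)).map (fun ch => (ch.toNat : Int) - 33) else none)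
      = colVals qss j := by
  unfold colVals
  congr 1
  funext qs
  by_cases h : (j : Int) < PySem.Str.len qs
  · have hj : j < qs.toList.length := by
      rw [PySem.Str.len_eq] at h; exact_mod_cast h
    rw [if_pos h]
    congr 1
    simp [pysem]
  · have hj : qs.toList.length ≤ j := by
      rw [PySem.Str.len_eq] at h; omega
    rw [if_neg h, List.getElem?_eq_none hj]
    simp

theorem colVals_ne_nil (qss : List String) (qs0 : String) (h0 : qs0 ∈ qss) (j : Nat)
    (hj : j < qs0.toList.length) : (colVals qss j).length ≠ 0 := by
  have : ((qs0.toList[j].toNat : Int) - 33) ∈ colVals qss j := by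
    simp only [colVals, List.mem_filterMap]
    exact ⟨qs0, h0, by simp [List.getElem?_eq_getElem hj]⟩
  intro hlen
  rw [List.length_eq_zero_iff] at hlen
  simp [hlen] at this

-- ===== VERDICT (by name: the statement is the Claim_ definition above) =====
theorem average_per_base_quality_spec : Claim_equal_average_per_base_quality := by
  intro qss _ hpre
  unfold Spec_average_per_base_quality average_per_base_quality average_per_base_quality_alt
  -- the max exists: qss is nonempty
  obtain ⟨m, hm⟩ : ∃ m, PySem.List.max? (qss.map (fun qs => PySem.Str.len qs)) (fun x => x) = some m := by
    cases hcase : PySem.List.max? (qss.map (fun qs => PySem.Str.len qs)) (fun x => x) with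
    | none =>
      rw [PySem.List.max?_eq_none_iff, List.map_eq_nil_iff] at hcase
      exact absurd hcase hpre
    | some m => exact ⟨m, rfl⟩
  obtain ⟨qs0, hqs0_mem, hqs0_len⟩ : ∃ qs0 ∈ qss, PySem.Str.len qs0 = m := by
    have := PySem.List.max?_mem hm
    simpa using this
  have hmax : ∀ qs ∈ qss, PySem.Str.len qs ≤ m := by
    intro qs hqs
    exact PySem.List.max?_isMax hm _ (by simpa using ⟨qs, hqs, rfl⟩)
  have hm0 : 0 ≤ m := by
    rw [← hqs0_len, PySem.Str.len_eq]; positivity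
  have hbound : ∀ qs ∈ qss, qs.toList.length ≤ m.toNat := by
    intro qs hqs
    have := hmax qs hqs
    rw [PySem.Str.len_eq] at this
    omega
  simp only [hm, Option.getD_some]
  set w : Nat := m.toNat with hw
  have hrep : ∀ qs ∈ qss, qs.toList.length ≤ (List.replicate w (0:Int)).length := by
    simpa using hbound
  have hfl := pA_fold_len qss (List.replicate w (0:Int)) (List.replicate w (0:Int))
  rw [PySem.List.pyRange_one]
  have hsub : m - 0 = m := by ring
  rw [hsub]
  simp only [hfl.1, List.length_replicate]
  rw [List.map_map]
  apply List.map_congr_left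
  intro j hj
  rw [List.mem_range] at hj
  have hfold := pA_fold_getD qss (List.replicate w (0:Int)) (List.replicate w (0:Int)) hrep hrep j
  simp only [pv_getD_replicate, zero_add] at hfold
  have hcnt : (colVals qss j).length ≠ 0 := by
    apply colVals_ne_nil qss qs0 hqs0_mem
    rw [PySem.Str.len_eq] at hqs0_len
    omega
  rw [hfold.1, hfold.2]
  rw [if_pos (by exact_mod_cast hcnt)]
  have hcomp : ((0 : Int) + (j : Int)) = (j : Int) := by ring
  simp only [Function.comp_apply, hcomp]
  rw [alt_vals qss j]
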